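-- pv_equiv track=rewrite | github.com/zohoora/dialectic | src/learning/classifier.py | _extract_subtags
-- ===== SOURCE A (Python) =====
-- def _extract_subtags(query_lower: str) -> list[str]:
--     """Extract relevant subtags from query."""
--     subtags = []
--
--     # Pain-related
--     if "chronic" in query_lower and "pain" in query_lower:
--         subtags.append("chronic_pain")
--     if "acute" in query_lower and "pain" in query_lower:
--         subtags.append("acute_pain")
--     if any(w in query_lower for w in ["neuropath", "nerve"]):
--         subtags.append("neuropathic")
--
--     # Treatment type
--     if any(w in query_lower for w in ["drug", "medication", "prescri", "dose"]):
--         subtags.append("pharmacological")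
--     if any(w in query_lower for w in ["procedure", "intervention", "inject", "block", "surgery"]):
--         subtags.append("interventional")
--
--     # Special populations
--     if any(w in query_lower for w in ["child", "pediatric", "infant"]):
--         subtags.append("pediatric")
--     if any(w in query_lower for w in ["elderly", "geriatric", "older", "aged"]):
--         subtags.append("geriatric")
--     if any(w in query_lower for w in ["pregnan", "breastfeed", "lactati"]):
--         subtags.append("pregnancy")
--
--     # Evidence status
--     if any(w in query_lower for w in ["off-label", "off label", "offlabel", "experimental", "novel"]):
--         subtags.append("off_label")
--     if any(w in query_lower for w in ["sparse", "limited evidence", "few studies"]):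
--         subtags.append("evidence_sparse")
--     if any(w in query_lower for w in ["conflict", "controver", "debat"]):
--         subtags.append("evidence_conflicting")
--
--     # Urgency
--     if any(w in query_lower for w in ["urgent", "emergenc", "immediate", "acute"]):
--         subtags.append("time_sensitive")
--
--     return subtags
-- ===== SOURCE B (Python) =====
-- # Distinct keywords, flattened from all rules.
-- _KEYWORDS = [
--     "chronic", "pain", "acute", "neuropath", "nerve",
--     "drug", "medication", "prescri", "dose",
--     "procedure", "intervention", "inject", "block", "surgery",
--     "child", "pediatric", "infant",
--     "elderly", "geriatric", "older", "aged",
--     "pregnan", "breastfeed", "lactati",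
--     "off-label", "off label", "offlabel", "experimental", "novel",
--     "sparse", "limited evidence", "few studies",
--     "conflict", "controver", "debat",
--     "urgent", "emergenc", "immediate",
-- ]
--
-- # Each rule is a CNF clause list: the tag fires iff every clause shares at
-- # least one keyword with the set of keywords found in the query.
-- _RULES = [
--     ("chronic_pain", [["chronic"], ["pain"]]),
--     ("acute_pain", [["acute"], ["pain"]]),
--     ("neuropathic", [["neuropath", "nerve"]]),
--     ("pharmacological", [["drug", "medication", "prescri", "dose"]]),
--     ("interventional", [["procedure", "intervention", "inject", "block", "surgery"]]),
--     ("pediatric", [["child", "pediatric", "infant"]]),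
--     ("geriatric", [["elderly", "geriatric", "older", "aged"]]),
--     ("pregnancy", [["pregnan", "breastfeed", "lactati"]]),
--     ("off_label", [["off-label", "off label", "offlabel", "experimental", "novel"]]),
--     ("evidence_sparse", [["sparse", "limited evidence", "few studies"]]),
--     ("evidence_conflicting", [["conflict", "controver", "debat"]]),
--     ("time_sensitive", [["urgent", "emergenc", "immediate", "acute"]]),
-- ]
--
--
-- def _extract_subtags(query_lower: str) -> list[str]:
--     # Phase 1: one left-to-right scan of the text, collecting every keyword
--     # that starts at some position (text-major matching).
--     found = set()
--     for i in range(len(query_lower) + 1):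
--         for w in _KEYWORDS:
--             if query_lower.startswith(w, i):
--                 found.add(w)
--     # Phase 2: pure boolean CNF evaluation over the found-keyword set.
--     return [tag for tag, clauses in _RULES
--             if all(not found.isdisjoint(c) for c in clauses)]
-- ===== Notes on version B (the rewrite author's own statement) =====
-- stated objective: alternative
-- what changed: Instead of A's twelve independent substring tests, B first makes one text-major scan of the query (at each position, record which of the 38 distinct keywords starts there) building a found-keyword set, then evaluates each rule as a CNF clause list by set-intersection against that set, so the rule phase does no string work at all.
import Mathlib
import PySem

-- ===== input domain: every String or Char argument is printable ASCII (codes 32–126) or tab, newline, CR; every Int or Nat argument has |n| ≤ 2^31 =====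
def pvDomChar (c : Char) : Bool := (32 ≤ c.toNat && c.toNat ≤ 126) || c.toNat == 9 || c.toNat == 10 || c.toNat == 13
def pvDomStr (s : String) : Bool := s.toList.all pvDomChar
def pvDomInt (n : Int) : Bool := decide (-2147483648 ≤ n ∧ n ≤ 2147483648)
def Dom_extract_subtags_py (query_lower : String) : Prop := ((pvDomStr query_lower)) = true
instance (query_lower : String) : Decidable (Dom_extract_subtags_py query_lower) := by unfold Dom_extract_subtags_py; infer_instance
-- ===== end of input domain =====

-- B replaces A's per-rule substring tests by one text-major scan that collects a found-keyword
-- set, followed by CNF-clause evaluation by set intersection (objective: alternative).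


-- ===== PORT A =====
def extract_subtags_py (query_lower : String) : List String :=
  let subtags : List String := []
  -- Pain-related
  let subtags := if PySem.Str.isIn "chronic" query_lower && PySem.Str.isIn "pain" query_lower then subtags ++ ["chronic_pain"] else subtags
  let subtags := if PySem.Str.isIn "acute" query_lower && PySem.Str.isIn "pain" query_lower then subtags ++ ["acute_pain"] else subtags
  let subtags := if ["neuropath", "nerve"].any (fun w => PySem.Str.isIn w query_lower) then subtags ++ ["neuropathic"] else subtags
  -- Treatment type
  let subtags := if ["drug", "medication", "prescri", "dose"].any (fun w => PySem.Str.isIn w query_lower) then subtags ++ ["pharmacological"] else subtags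
  let subtags := if ["procedure", "intervention", "inject", "block", "surgery"].any (fun w => PySem.Str.isIn w query_lower) then subtags ++ ["interventional"] else subtags
  -- Special populations
  let subtags := if ["child", "pediatric", "infant"].any (fun w => PySem.Str.isIn w query_lower) then subtags ++ ["pediatric"] else subtags
  let subtags := if ["elderly", "geriatric", "older", "aged"].any (fun w => PySem.Str.isIn w query_lower) then subtags ++ ["geriatric"] else subtags
  let subtags := if ["pregnan", "breastfeed", "lactati"].any (fun w => PySem.Str.isIn w query_lower) then subtags ++ ["pregnancy"] else subtags
  -- Evidence status
  let subtags := if ["off-label", "off label", "offlabel", "experimental", "novel"].any (fun w => PySem.Str.isIn w query_lower) then subtags ++ ["off_label"] else subtags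
  let subtags := if ["sparse", "limited evidence", "few studies"].any (fun w => PySem.Str.isIn w query_lower) then subtags ++ ["evidence_sparse"] else subtags
  let subtags := if ["conflict", "controver", "debat"].any (fun w => PySem.Str.isIn w query_lower) then subtags ++ ["evidence_conflicting"] else subtags
  -- Urgency
  let subtags := if ["urgent", "emergenc", "immediate", "acute"].any (fun w => PySem.Str.isIn w query_lower) then subtags ++ ["time_sensitive"] else subtags
  subtags

-- ===== PORT B =====
-- B's distinct keyword list (_KEYWORDS in Source B)
def kwList : List String :=
  [ "chronic", "pain", "acute", "neuropath", "nerve",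
    "drug", "medication", "prescri", "dose",
    "procedure", "intervention", "inject", "block", "surgery",
    "child", "pediatric", "infant",
    "elderly", "geriatric", "older", "aged",
    "pregnan", "breastfeed", "lactati",
    "off-label", "off label", "offlabel", "experimental", "novel",
    "sparse", "limited evidence", "few studies",
    "conflict", "controver", "debat",
    "urgent", "emergenc", "immediate" ]

-- B's CNF rule table (_RULES in Source B): tag fires iff every clause meets the found set
def ruleCNF : List (String × List (List String)) :=
  [ ("chronic_pain", [["chronic"], ["pain"]]),
    ("acute_pain", [["acute"], ["pain"]]),
    ("neuropathic", [["neuropath", "nerve"]]),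
    ("pharmacological", [["drug", "medication", "prescri", "dose"]]),
    ("interventional", [["procedure", "intervention", "inject", "block", "surgery"]]),
    ("pediatric", [["child", "pediatric", "infant"]]),
    ("geriatric", [["elderly", "geriatric", "older", "aged"]]),
    ("pregnancy", [["pregnan", "breastfeed", "lactati"]]),
    ("off_label", [["off-label", "off label", "offlabel", "experimental", "novel"]]),
    ("evidence_sparse", [["sparse", "limited evidence", "few studies"]]),
    ("evidence_conflicting", [["conflict", "controver", "debat"]]),
    ("time_sensitive", [["urgent", "emergenc", "immediate", "acute"]]) ]

-- Python's q.startswith(w, i) (0 ≤ i) is exactly 'w.toList <+: q.toList.drop i',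
-- i.e. PySem.Chars.startswith on the dropped suffix.
def extract_subtags_py_alt (query_lower : String) : List String :=
  let found : PySem.Set String :=
    (PySem.List.pyRange 0 ((query_lower.toList.length : Int) + 1) 1).foldl
      (fun s i => kwList.foldl
        (fun s w =>
          if PySem.Chars.startswith (query_lower.toList.drop i.toNat) w.toList
          then PySem.Set.add s w else s) s)
      PySem.Set.empty
  (ruleCNF.filter (fun r =>
      r.2.all (fun c => !(PySem.Set.isdisjoint found c)))).map (fun r => r.1)

-- ===== PRECONDITION & SPEC =====
def Spec_extract_subtags_py (query_lower : String) (out : List String) : Prop := out = extract_subtags_py_alt query_lower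
instance (query_lower : String) (out : List String) : Decidable (Spec_extract_subtags_py query_lower out) := by unfold Spec_extract_subtags_py; infer_instance

-- ===== CLAIM (what is proved, stated in full; the proofs are below) =====
def Claim_equal_extract_subtags_py : Prop := ∀ (query_lower : String), Dom_extract_subtags_py query_lower → Spec_extract_subtags_py query_lower (extract_subtags_py query_lower)

-- ===== LEMMAS AND PROOFS =====

-- A's result as a fold over a list of (tag, condition) pairs
def condList (q : String) : List (String × Bool) :=
  [ ("chronic_pain", PySem.Str.isIn "chronic" q && PySem.Str.isIn "pain" q),
    ("acute_pain", PySem.Str.isIn "acute" q && PySem.Str.isIn "pain" q),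
    ("neuropathic", ["neuropath", "nerve"].any (fun w => PySem.Str.isIn w q)),
    ("pharmacological", ["drug", "medication", "prescri", "dose"].any (fun w => PySem.Str.isIn w q)),
    ("interventional", ["procedure", "intervention", "inject", "block", "surgery"].any (fun w => PySem.Str.isIn w q)),
    ("pediatric", ["child", "pediatric", "infant"].any (fun w => PySem.Str.isIn w q)),
    ("geriatric", ["elderly", "geriatric", "older", "aged"].any (fun w => PySem.Str.isIn w q)),
    ("pregnancy", ["pregnan", "breastfeed", "lactati"].any (fun w => PySem.Str.isIn w q)),
    ("off_label", ["off-label", "off label", "offlabel", "experimental", "novel"].any (fun w => PySem.Str.isIn w q)),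
    ("evidence_sparse", ["sparse", "limited evidence", "few studies"].any (fun w => PySem.Str.isIn w q)),
    ("evidence_conflicting", ["conflict", "controver", "debat"].any (fun w => PySem.Str.isIn w q)),
    ("time_sensitive", ["urgent", "emergenc", "immediate", "acute"].any (fun w => PySem.Str.isIn w q)) ]

theorem portA_eq_foldl (q : String) :
    extract_subtags_py q
      = (condList q).foldl (fun a r => if r.2 then a ++ [r.1] else a) [] := rfl

theorem foldl_append_eq_filter_map (rules : List (String × Bool)) (acc : List String) :
    rules.foldl (fun a r => if r.2 then a ++ [r.1] else a) acc
      = acc ++ (rules.filter (fun r => r.2)).map (fun r => r.1) := by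
  induction rules generalizing acc with
  | nil => simp
  | cons r rest ih =>
    cases h : r.2 <;> simp [List.foldl_cons, h, ih]

-- membership in the inner (keyword-loop) fold
theorem mem_inner_fold (q : String) (ws : List String) (s : PySem.Set String) (i : Int) (w : String) :
    w ∈ ws.foldl
        (fun s w' => if PySem.Chars.startswith (q.toList.drop i.toNat) w'.toList
                     then PySem.Set.add s w' else s) s
      ↔ w ∈ s ∨ (w ∈ ws ∧ PySem.Chars.startswith (q.toList.drop i.toNat) w.toList = true) := by
  induction ws generalizing s with
  | nil => simp
  | cons x xs ih =>
    by_cases h : PySem.Chars.startswith (q.toList.drop i.toNat) x.toList = true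
    · simp only [List.foldl_cons, if_pos h, ih, PySem.Set.mem_add, List.mem_cons]
      constructor
      · rintro ((hs | rfl) | ⟨hm, hp⟩)
        · exact Or.inl hs
        · exact Or.inr ⟨Or.inl rfl, h⟩
        · exact Or.inr ⟨Or.inr hm, hp⟩
      · rintro (hs | ⟨(rfl | hm), hp⟩)
        · exact Or.inl (Or.inl hs)
        · exact Or.inl (Or.inr rfl)
        · exact Or.inr ⟨hm, hp⟩
    · simp only [List.foldl_cons, if_neg h, ih, List.mem_cons]
      constructor
      · rintro (hs | ⟨hm, hp⟩)
        · exact Or.inl hs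
        · exact Or.inr ⟨Or.inr hm, hp⟩
      · rintro (hs | ⟨(rfl | hm), hp⟩)
        · exact Or.inl hs
        · exact absurd hp h
        · exact Or.inr ⟨hm, hp⟩

-- membership in the outer (position-loop) fold
theorem mem_outer_fold (q : String) (is : List Int) (s : PySem.Set String) (w : String) :
    w ∈ is.foldl
        (fun s i => kwList.foldl
          (fun s w' => if PySem.Chars.startswith (q.toList.drop i.toNat) w'.toList
                       then PySem.Set.add s w' else s) s) s
      ↔ w ∈ s ∨ (w ∈ kwList ∧ ∃ i ∈ is, PySem.Chars.startswith (q.toList.drop i.toNat) w.toList = true) := by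
  induction is generalizing s with
  | nil => simp
  | cons i rest ih =>
    simp only [List.foldl_cons, ih, mem_inner_fold, List.mem_cons]
    constructor
    · rintro ((hs | ⟨hm, hp⟩) | ⟨hm, j, hj, hp⟩)
      · exact Or.inl hs
      · exact Or.inr ⟨hm, i, Or.inl rfl, hp⟩
      · exact Or.inr ⟨hm, j, Or.inr hj, hp⟩
    · rintro (hs | ⟨hm, j, (rfl | hj), hp⟩)
      · exact Or.inl (Or.inl hs)
      · exact Or.inl (Or.inr ⟨hm, hp⟩)
      · exact Or.inr ⟨hm, j, hj, hp⟩

-- the found set contains w iff w is a listed keyword occurring as a substring of q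
theorem mem_found_iff (q : String) (w : String) :
    w ∈ ((PySem.List.pyRange 0 ((q.toList.length : Int) + 1) 1).foldl
          (fun s i => kwList.foldl
            (fun s w' => if PySem.Chars.startswith (q.toList.drop i.toNat) w'.toList
                         then PySem.Set.add s w' else s) s)
          PySem.Set.empty)
      ↔ w ∈ kwList ∧ PySem.Str.isIn w q = true := by
  rw [mem_outer_fold]
  simp only [PySem.Set.empty, List.not_mem_nil, false_or]
  constructor
  · rintro ⟨hm, i, hi, hp⟩
    refine ⟨hm, ?_⟩
    rw [PySem.Str.isIn_eq, ← PySem.Chars.exists_prefix_drop_iff_isIn]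
    exact ⟨i.toNat, (PySem.Chars.startswith_iff _ _).mp hp⟩
  · rintro ⟨hm, hin⟩
    refine ⟨hm, ?_⟩
    rw [PySem.Str.isIn_eq, ← PySem.Chars.exists_prefix_drop_iff_isIn] at hin
    obtain ⟨j, hj⟩ := hin
    by_cases hle : j ≤ q.toList.length
    · refine ⟨(j : Int), ?_, ?_⟩
      · rw [PySem.List.mem_pyRange_one]
        constructor
        · exact_mod_cast Nat.zero_le j
        · exact_mod_cast Nat.lt_succ_of_le hle
      · rw [(by simp : ((j : Int)).toNat = j)]
        exact (PySem.Chars.startswith_iff _ _).mpr hj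
    · -- j past the end: the dropped suffix is [], so w is a prefix of everything
      rw [not_le] at hle
      have hnil : q.toList.drop j = [] := List.drop_eq_nil_of_le (le_of_lt hle)
      rw [hnil] at hj
      have hw : w.toList = [] := List.prefix_nil.mp hj
      exact ⟨0, by rw [PySem.List.mem_pyRange_one]; omega,
        (PySem.Chars.startswith_iff _ _).mpr (by rw [hw]; exact List.nil_prefix)⟩

-- a clause all of whose words are listed keywords meets the found set iff some word occurs in q
theorem all_congr_mem {A : Type} (l : List A) (p q : A → Bool) (h : ∀ x ∈ l, p x = q x) :
    l.all p = l.all q := by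
  induction l with
  | nil => rfl
  | cons x xs ih =>
    simp only [List.all_cons, h x (List.mem_cons_self), ih (fun y hy => h y (List.mem_cons_of_mem x hy))]

theorem clause_meets_iff (q : String) (c : List String) (hc : ∀ w ∈ c, w ∈ kwList) :
    (!(PySem.Set.isdisjoint
        ((PySem.List.pyRange 0 ((q.toList.length : Int) + 1) 1).foldl
          (fun s i => kwList.foldl
            (fun s w' => if PySem.Chars.startswith (q.toList.drop i.toNat) w'.toList
                         then PySem.Set.add s w' else s) s)
          PySem.Set.empty) c))
      = c.any (fun w => PySem.Str.isIn w q) := by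
  rcases h : c.any (fun w => PySem.Str.isIn w q) with _ | _
  · have hd : PySem.Set.isdisjoint
        ((PySem.List.pyRange 0 ((q.toList.length : Int) + 1) 1).foldl
          (fun s i => kwList.foldl
            (fun s w' => if PySem.Chars.startswith (q.toList.drop i.toNat) w'.toList
                         then PySem.Set.add s w' else s) s)
          PySem.Set.empty) c = true := by
      rw [PySem.Set.isdisjoint_iff]
      intro x hx hxc
      rw [mem_found_iff] at hx
      simp only [List.any_eq_false] at h
      exact h x hxc hx.2
    rw [hd]; rfl
  · have hd : PySem.Set.isdisjoint
        ((PySem.List.pyRange 0 ((q.toList.length : Int) + 1) 1).foldl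
          (fun s i => kwList.foldl
            (fun s w' => if PySem.Chars.startswith (q.toList.drop i.toNat) w'.toList
                         then PySem.Set.add s w' else s) s)
          PySem.Set.empty) c = false := by
      simp only [List.any_eq_true] at h
      obtain ⟨w, hw, hin⟩ := h
      refine Bool.eq_false_iff.mpr (fun hd' => ?_)
      rw [PySem.Set.isdisjoint_iff] at hd'
      exact hd' w ((mem_found_iff q w).mpr ⟨hc w hw, hin⟩) hw
    rw [hd]; rfl

theorem condList_eq_map (q : String) :
    condList q = ruleCNF.map (fun r => (r.1, r.2.all (fun c => c.any (fun w => PySem.Str.isIn w q)))) := by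
  simp [condList, ruleCNF]

theorem portB_eq_filter_map (q : String) :
    extract_subtags_py_alt q
      = ((condList q).filter (fun r => r.2)).map (fun r => r.1) := by
  show (ruleCNF.filter _).map _ = _
  have hall : ∀ r ∈ ruleCNF, ∀ c ∈ r.2, ∀ w ∈ c, w ∈ kwList := by decide
  have hfc : ruleCNF.filter (fun r =>
        r.2.all (fun c => !(PySem.Set.isdisjoint
          ((PySem.List.pyRange 0 ((q.toList.length : Int) + 1) 1).foldl
            (fun s i => kwList.foldl
              (fun s w' => if PySem.Chars.startswith (q.toList.drop i.toNat) w'.toList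
                           then PySem.Set.add s w' else s) s)
            PySem.Set.empty) c)))
      = ruleCNF.filter (fun r => r.2.all (fun c => c.any (fun w => PySem.Str.isIn w q))) := by
    apply List.filter_congr
    intro r hr
    exact all_congr_mem _ _ _ (fun c hcl => clause_meets_iff q c (hall r hr c hcl))
  rw [hfc, condList_eq_map, List.filter_map, List.map_map]
  rfl

-- ===== VERDICT (by name: the statement is the Claim_ definition above) =====
theorem extract_subtags_py_spec : Claim_equal_extract_subtags_py := by
  intro q _
  unfold Spec_extract_subtags_py
  rw [portA_eq_foldl, foldl_append_eq_filter_map, portB_eq_filter_map, List.nil_append]
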